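-- pv_equiv track=rewrite | github.com/nomdedev/Rexus.app | legacy_root/tools/performance/analyze_queries.py | _get_function_block
-- ===== SOURCE A (Python) =====
-- from typing import Dict, List, Any, Set, Tuple
--
-- def _get_function_block(lines: List[str], start_idx: int) -> List[str]:
--     """Obtiene el bloque completo de una función."""
--     function_lines = []
--     indent_level = len(lines[start_idx]) - len(lines[start_idx].lstrip())
--
--     for i in range(start_idx, min(len(lines), start_idx + 50)):  # Máximo 50 líneas
--         line = lines[i]
--         if line.strip() == '':
--             continue
--
--         current_indent = len(line) - len(line.lstrip())
--         if i > start_idx and current_indent <= indent_level and line.strip():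
--             break
--
--         function_lines.append(line)
--
--     return function_lines
-- ===== SOURCE B (Python) =====
-- def _get_function_block(lines, start_idx):
--     """Two-phase version: find the block's end index first, then collect non-blank lines."""
--     first = lines[start_idx]
--     indent_level = len(first) - len(first.lstrip())
--     stop = min(len(lines), start_idx + 50)
--     end = stop
--     for i in range(start_idx + 1, stop):
--         line = lines[i]
--         if line.strip() and len(line) - len(line.lstrip()) <= indent_level:
--             end = i
--             break
--     return [lines[i] for i in range(start_idx, end) if lines[i].strip()]
-- ===== Notes on version B (the rewrite author's own statement) =====
-- stated objective: simpler
-- what changed: Splits A's single accumulate-skip-break loop into two phases: a boundary search that finds the first dedented non-blank line after start_idx, then a comprehension collecting the non-blank lines of lines[start_idx:end].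
import Mathlib
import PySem

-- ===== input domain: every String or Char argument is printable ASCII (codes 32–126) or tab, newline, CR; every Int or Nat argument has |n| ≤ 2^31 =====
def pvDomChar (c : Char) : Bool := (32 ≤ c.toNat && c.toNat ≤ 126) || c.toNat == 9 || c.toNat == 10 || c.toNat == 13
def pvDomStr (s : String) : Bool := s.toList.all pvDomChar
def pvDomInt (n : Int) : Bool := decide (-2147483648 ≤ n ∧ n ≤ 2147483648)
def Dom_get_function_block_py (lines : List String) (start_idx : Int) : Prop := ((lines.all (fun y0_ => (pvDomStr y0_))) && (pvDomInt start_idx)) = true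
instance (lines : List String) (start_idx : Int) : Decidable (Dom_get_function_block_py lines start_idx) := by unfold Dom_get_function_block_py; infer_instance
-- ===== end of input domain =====

-- B separates boundary-finding from line-collection (two phases) instead of A's single
-- accumulate-skip-break loop; same cost, simpler shape. Equivalence proved on in-range start_idx.

-- ===== PORT A =====
def pvLineA (lines : List String) (i : Int) : String :=
  (PySem.List.pyGet? lines i).getD ""   -- lines[i]; Pre_ keeps every accessed index in range

def pvIndentA (line : String) : Int :=
  PySem.Str.len line - PySem.Str.len (PySem.Str.lstrip line)

-- the for-loop with continue/break, over the list of indices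
def pvALoop (lines : List String) (start_idx indent_level : Int) : List Int → List String
  | [] => []
  | i :: rest =>
    let line := pvLineA lines i
    if PySem.Str.strip line == "" then pvALoop lines start_idx indent_level rest
    else if start_idx < i ∧ pvIndentA line ≤ indent_level ∧ PySem.Str.strip line ≠ "" then []
    else line :: pvALoop lines start_idx indent_level rest

def get_function_block_py (lines : List String) (start_idx : Int) : List String :=
  let indent_level := pvIndentA (pvLineA lines start_idx)
  pvALoop lines start_idx indent_level
    (PySem.List.pyRange start_idx (min (lines.length : Int) (start_idx + 50)) 1)

-- ===== PORT B =====
def pvLineB (lines : List String) (i : Int) : String :=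
  (PySem.List.pyGet? lines i).getD ""

def pvIndentB (line : String) : Int :=
  PySem.Str.len line - PySem.Str.len (PySem.Str.lstrip line)

-- phase 1: first index in [a, stop) whose non-blank line dedents to ≤ lvl; stop if none
def pvEndIdx (lines : List String) (lvl a stop : Int) : Int :=
  match (PySem.List.pyRange a stop 1).find?
      (fun i => decide (PySem.Str.strip (pvLineB lines i) ≠ "" ∧ pvIndentB (pvLineB lines i) ≤ lvl)) with
  | some i => i
  | none => stop

def get_function_block_py_alt (lines : List String) (start_idx : Int) : List String :=
  let indent_level := pvIndentB (pvLineB lines start_idx)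
  let stop := min (lines.length : Int) (start_idx + 50)
  let endIdx := pvEndIdx lines indent_level (start_idx + 1) stop
  -- phase 2: the comprehension [lines[i] for i in range(start_idx, end) if lines[i].strip()]
  (PySem.List.pyRange start_idx endIdx 1).filterMap
    (fun i => let line := pvLineB lines i
              if PySem.Str.strip line ≠ "" then some line else none)

-- ===== PRECONDITION & SPEC =====
-- Pre_: lines[start_idx] is a valid (possibly negative) Python index; A raises IndexError otherwise.
def Pre_get_function_block_py (lines : List String) (start_idx : Int) : Prop :=
  -(lines.length : Int) ≤ start_idx ∧ start_idx < (lines.length : Int)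
instance (lines : List String) (start_idx : Int) : Decidable (Pre_get_function_block_py lines start_idx) := by unfold Pre_get_function_block_py; infer_instance

def pvWitness_get_function_block_py : List String × Int := (["def f():", "    x = 1", "", "def g():"], 0)

def Spec_get_function_block_py (lines : List String) (start_idx : Int) (out : List String) : Prop := out = get_function_block_py_alt lines start_idx
instance (lines : List String) (start_idx : Int) (out : List String) : Decidable (Spec_get_function_block_py lines start_idx out) := by unfold Spec_get_function_block_py; infer_instance

-- ===== CLAIM (what is proved, stated in full; the proofs are below) =====
def Claim_equal_get_function_block_py : Prop := ∀ (lines : List String) (start_idx : Int), Dom_get_function_block_py lines start_idx → Pre_get_function_block_py lines start_idx → Spec_get_function_block_py lines start_idx (get_function_block_py lines start_idx)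

-- ===== LEMMAS AND PROOFS =====

-- the end index found from a is at least a (it is a member of range(a, stop) or stop itself)
theorem pvEndIdx_ge (lines : List String) (lvl a stop : Int) (h : a ≤ stop) :
    a ≤ pvEndIdx lines lvl a stop := by
  unfold pvEndIdx
  cases hf : (PySem.List.pyRange a stop 1).find?
      (fun i => decide (PySem.Str.strip (pvLineB lines i) ≠ "" ∧ pvIndentB (pvLineB lines i) ≤ lvl)) with
  | none => simpa using h
  | some i =>
      have := List.mem_of_find?_eq_some hf
      exact ((PySem.List.mem_pyRange_one).1 this).1

-- core: A's loop tail (indices all > start_idx) equals B's find-then-filter decomposition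
theorem loop_eq (lines : List String) (s lvl stop : Int) :
    ∀ (n : Nat) (a : Int), stop - a ≤ n → s < a →
    pvALoop lines s lvl (PySem.List.pyRange a stop 1) =
      (PySem.List.pyRange a (pvEndIdx lines lvl a stop) 1).filterMap
        (fun i => let line := pvLineB lines i
                  if PySem.Str.strip line ≠ "" then some line else none) := by
  intro n
  induction n with
  | zero =>
      intro a hle hs
      have hba : stop ≤ a := by omega
      rw [PySem.List.pyRange_one_eq_nil hba]
      unfold pvEndIdx
      rw [PySem.List.pyRange_one_eq_nil hba]
      simp [pvALoop, PySem.List.pyRange_one_eq_nil hba]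
  | succ n ih =>
      intro a hle hs
      by_cases hba : stop ≤ a
      · rw [PySem.List.pyRange_one_eq_nil hba]
        unfold pvEndIdx
        rw [PySem.List.pyRange_one_eq_nil hba]
        simp [pvALoop, PySem.List.pyRange_one_eq_nil hba]
      · have hab : a < stop := by omega
        rw [PySem.List.pyRange_one_cons hab]
        by_cases hp : PySem.Str.strip (pvLineB lines a) ≠ "" ∧ pvIndentB (pvLineB lines a) ≤ lvl
        · -- the first line of the tail already ends the block
          have hend : pvEndIdx lines lvl a stop = a := by
            unfold pvEndIdx
            rw [PySem.List.pyRange_one_cons hab, List.find?_cons_of_pos]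
            simpa using hp
          rw [hend, PySem.List.pyRange_one_eq_nil (le_refl a)]
          have hstrip : ¬ (PySem.Str.strip (pvLineB lines a) == "") = true := by
            simpa using hp.1
          simp only [pvALoop, pvLineA, pvLineB] at *
          rw [if_neg hstrip, if_pos ⟨hs, hp.2, hp.1⟩]
          simp
        · -- head does not end the block: endIdx comes from the rest of the range
          have hend : pvEndIdx lines lvl a stop = pvEndIdx lines lvl (a + 1) stop := by
            unfold pvEndIdx
            rw [PySem.List.pyRange_one_cons hab, List.find?_cons_of_neg]
            simpa using hp
          have hge : a + 1 ≤ pvEndIdx lines lvl (a + 1) stop :=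
            pvEndIdx_ge lines lvl (a + 1) stop (by omega)
          have hsplit : PySem.List.pyRange a (pvEndIdx lines lvl a stop) 1 =
              a :: PySem.List.pyRange (a + 1) (pvEndIdx lines lvl (a + 1) stop) 1 := by
            rw [hend, PySem.List.pyRange_one_cons (by omega)]
          rw [hsplit, List.filterMap_cons]
          have ihr := ih (a + 1) (by omega) (by omega)
          by_cases hb : PySem.Str.strip (pvLineB lines a) = ""
          · -- blank line: A skips it, B's filter drops it
            simp only [pvALoop, pvLineA, pvLineB] at *
            rw [if_pos (by simpa using hb)]
            rw [ihr]
            simp [hb]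
          · -- kept line (still indented deeper): both keep it
            have hind : ¬ pvIndentB (pvLineB lines a) ≤ lvl := by
              by_contra hc; exact hp ⟨hb, hc⟩
            simp only [pvALoop, pvLineA, pvLineB, pvIndentA, pvIndentB] at *
            rw [if_neg (by simpa using hb), if_neg (by rintro ⟨-, h2, -⟩; exact hind h2)]
            rw [ihr]
            simp [hb]

theorem get_function_block_py_spec : Claim_equal_get_function_block_py := by
  intro lines start_idx _ hpre
  obtain ⟨h1, h2⟩ := hpre
  unfold Spec_get_function_block_py get_function_block_py get_function_block_py_alt
  simp only [pvLineA, pvLineB, pvIndentA, pvIndentB]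
  set lvl := PySem.Str.len ((PySem.List.pyGet? lines start_idx).getD "") -
    PySem.Str.len (PySem.Str.lstrip ((PySem.List.pyGet? lines start_idx).getD "")) with hlvl
  set stop := min (lines.length : Int) (start_idx + 50) with hstop
  have hss : start_idx < stop := by omega
  -- peel off the first index of A's loop (i = start_idx, where the break can never fire)
  rw [PySem.List.pyRange_one_cons hss]
  have hge : start_idx + 1 ≤ pvEndIdx lines lvl (start_idx + 1) stop :=
    pvEndIdx_ge lines lvl (start_idx + 1) stop (by omega)
  have hs2 : PySem.List.pyRange start_idx (pvEndIdx lines lvl (start_idx + 1) stop) 1 =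
      start_idx :: PySem.List.pyRange (start_idx + 1) (pvEndIdx lines lvl (start_idx + 1) stop) 1 :=
    PySem.List.pyRange_one_cons (by omega)
  have hrest := loop_eq lines start_idx lvl stop (stop - (start_idx + 1)).toNat (start_idx + 1)
      (by omega) (by omega)
  by_cases hb : PySem.Str.strip ((PySem.List.pyGet? lines start_idx).getD "") = ""
  · simp only [pvALoop, pvLineA]
    rw [if_pos (by simpa using hb), hrest, hs2, List.filterMap_cons]
    simp [pvLineB, hb]
  · simp only [pvALoop, pvLineA]
    rw [if_neg (by simpa using hb), if_neg (by rintro ⟨h, -, -⟩; omega), hrest, hs2,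
      List.filterMap_cons]
    simp [pvLineB, hb]
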